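-- pv_equiv track=rewrite | github.com/sosswced/uploadm8-auth | services/platform_metrics_job.py | _merge_metric_totals
-- ===== SOURCE A (Python) =====
-- from typing import Any, Dict, List, Optional, Tuple
--
-- def _metric_int(v: Any) -> int:
--     try:
--         return max(0, int(v or 0))
--     except Exception:
--         return 0
--
-- def _merge_metric_totals(rows: List[Dict[str, Any]], platform: str) -> Dict[str, int]:
--     totals = {"views": 0, "likes": 0, "comments": 0, "shares": 0}
--     for row in rows:
--         if not isinstance(row, dict):
--             continue
--         totals["views"] += _metric_int(row.get("views"))
--         if platform == "facebook":
--             totals["likes"] += _metric_int(row.get("reactions"))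
--         else:
--             totals["likes"] += _metric_int(row.get("likes"))
--         totals["comments"] += _metric_int(row.get("comments"))
--         totals["shares"] += _metric_int(row.get("shares"))
--     return totals
-- ===== SOURCE B (Python) =====
-- from typing import Any, Dict, List
--
--
-- def _metric_int(v: Any) -> int:
--     try:
--         return max(0, int(v or 0))
--     except Exception:
--         return 0
--
--
-- def _merge_metric_totals(rows: List[Dict[str, Any]], platform: str) -> Dict[str, int]:
--     likes_key = "reactions" if platform == "facebook" else "likes"
--     fields = {"views": "views", "likes": likes_key, "comments": "comments", "shares": "shares"}
--     return {
--         out: sum(_metric_int(row.get(key)) for row in rows if isinstance(row, dict))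
--         for out, key in fields.items()
--     }
-- ===== Notes on version B (the rewrite author's own statement) =====
-- stated objective: alternative
-- what changed: Transposed the loop nesting: instead of one pass over rows accumulating four dict fields with an inner platform branch, B picks the likes source key once, builds a field mapping, and computes each output field by its own sum() pass over the rows.
import Mathlib
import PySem

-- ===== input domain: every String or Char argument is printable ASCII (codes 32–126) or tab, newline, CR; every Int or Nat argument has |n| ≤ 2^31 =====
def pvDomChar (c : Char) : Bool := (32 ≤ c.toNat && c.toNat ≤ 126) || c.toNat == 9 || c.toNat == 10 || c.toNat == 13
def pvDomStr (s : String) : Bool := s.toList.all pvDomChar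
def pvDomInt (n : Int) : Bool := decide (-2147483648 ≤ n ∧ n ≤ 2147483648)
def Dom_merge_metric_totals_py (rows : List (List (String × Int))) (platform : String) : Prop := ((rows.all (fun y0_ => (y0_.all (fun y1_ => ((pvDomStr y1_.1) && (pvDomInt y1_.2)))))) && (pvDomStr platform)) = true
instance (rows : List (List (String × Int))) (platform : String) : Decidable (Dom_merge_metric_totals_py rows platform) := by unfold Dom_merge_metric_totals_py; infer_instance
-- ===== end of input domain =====

-- B transposes A's single accumulating pass into one independent summing pass per output
-- field, with the likes source key chosen once up front (objective: alternative decomposition).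

-- ===== PORT A =====
-- _metric_int(row.get(k)): row.get misses → None → int(None or 0) = 0; an Int v → max(0, v)
def pvMetricInt (v : Option Int) : Int := max 0 (v.getD 0)

-- the body of A's `for row in rows` loop (the isinstance check is always true for List (String × Int) rows)
def pvStepA (platform : String) (totals : PySem.Dict String Int) (row : List (String × Int)) : PySem.Dict String Int :=
  let totals := totals.modify "views" 0 (· + pvMetricInt ((PySem.Dict.mk row).get? "views"))
  let totals := if platform == "facebook"
    then totals.modify "likes" 0 (· + pvMetricInt ((PySem.Dict.mk row).get? "reactions"))
    else totals.modify "likes" 0 (· + pvMetricInt ((PySem.Dict.mk row).get? "likes"))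
  let totals := totals.modify "comments" 0 (· + pvMetricInt ((PySem.Dict.mk row).get? "comments"))
  totals.modify "shares" 0 (· + pvMetricInt ((PySem.Dict.mk row).get? "shares"))

def merge_metric_totals_py (rows : List (List (String × Int))) (platform : String) : List (String × Int) :=
  (rows.foldl (pvStepA platform)
    (PySem.Dict.ofList [("views", 0), ("likes", 0), ("comments", 0), ("shares", 0)])).items

-- ===== PORT B =====
-- sum(_metric_int(row.get(key)) for row in rows)
def pvFieldSum (rows : List (List (String × Int))) (key : String) : Int :=
  (rows.map (fun row => max 0 (((PySem.Dict.mk row).get? key).getD 0))).sum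

def merge_metric_totals_py_alt (rows : List (List (String × Int))) (platform : String) : List (String × Int) :=
  let likesKey := if platform == "facebook" then "reactions" else "likes"
  [("views", pvFieldSum rows "views"), ("likes", pvFieldSum rows likesKey),
   ("comments", pvFieldSum rows "comments"), ("shares", pvFieldSum rows "shares")]

-- ===== PRECONDITION & SPEC =====
def Spec_merge_metric_totals_py (rows : List (List (String × Int))) (platform : String) (out : List (String × Int)) : Prop := out = merge_metric_totals_py_alt rows platform
instance (rows : List (List (String × Int))) (platform : String) (out : List (String × Int)) : Decidable (Spec_merge_metric_totals_py rows platform out) := by unfold Spec_merge_metric_totals_py; infer_instance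

-- ===== CLAIM (what is proved, stated in full; the proofs are below) =====
def Claim_equal_merge_metric_totals_py : Prop := ∀ (rows : List (List (String × Int))) (platform : String), Dom_merge_metric_totals_py rows platform → Spec_merge_metric_totals_py rows platform (merge_metric_totals_py rows platform)

-- ===== LEMMAS AND PROOFS =====

-- one loop step of A on the literal four-key totals dict
theorem pvStepA_eval (platform : String) (row : List (String × Int)) (a b c d : Int) :
    pvStepA platform (PySem.Dict.mk [("views", a), ("likes", b), ("comments", c), ("shares", d)]) row
    = PySem.Dict.mk
        [("views", a + pvMetricInt ((PySem.Dict.mk row).get? "views")),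
         ("likes", b + pvMetricInt ((PySem.Dict.mk row).get?
            (if platform == "facebook" then "reactions" else "likes"))),
         ("comments", c + pvMetricInt ((PySem.Dict.mk row).get? "comments")),
         ("shares", d + pvMetricInt ((PySem.Dict.mk row).get? "shares"))] := by
  by_cases hp : platform == "facebook" <;>
    simp [pvStepA, hp, PySem.Dict.modify, PySem.Dict.getD, PySem.Dict.get?,
      PySem.Dict.insert, PySem.Dict.contains]

-- invariant: A's foldl keeps totals as the literal 4-key dict, each value a running sum
theorem pvFold_inv (rows : List (List (String × Int))) (platform : String) (a b c d : Int) :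
    rows.foldl (pvStepA platform)
      (PySem.Dict.mk [("views", a), ("likes", b), ("comments", c), ("shares", d)])
    = PySem.Dict.mk [("views", a + pvFieldSum rows "views"),
        ("likes", b + pvFieldSum rows (if platform == "facebook" then "reactions" else "likes")),
        ("comments", c + pvFieldSum rows "comments"),
        ("shares", d + pvFieldSum rows "shares")] := by
  induction rows generalizing a b c d with
  | nil => simp [pvFieldSum]
  | cons row rest ih =>
    rw [List.foldl_cons, pvStepA_eval, ih]
    simp [pvFieldSum, pvMetricInt, add_assoc]

-- ===== VERDICT (by name: the statement is the Claim_ definition above) =====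
theorem merge_metric_totals_py_spec : Claim_equal_merge_metric_totals_py := by
  intro rows platform _
  unfold Spec_merge_metric_totals_py merge_metric_totals_py merge_metric_totals_py_alt
  rw [show (PySem.Dict.ofList [("views", (0:Int)), ("likes", 0), ("comments", 0), ("shares", 0)])
      = PySem.Dict.mk [("views", 0), ("likes", 0), ("comments", 0), ("shares", 0)] from by decide]
  rw [pvFold_inv]
  simp
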